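-- pv_equiv track=rewrite | github.com/Sankalp-eldar/12th_Project | Python project(SMart)/source/Utility.py | limit_sep
-- ===== SOURCE A (Python) =====
-- def limit_sep(fields):
--     local_x = ([],[],[])
--     for i in fields:
--         if " " in i:
--             a = i.split(" ",maxsplit=2)
--             local_x[0].append(a[0]); local_x[1].append(a[1]); local_x[2].append(a[2])
--         else:
--             local_x[0].append(i); local_x[1].append(None); local_x[2].append(None)
--     return local_x
-- ===== SOURCE B (Python) =====
-- def limit_sep(fields):
--     # Build per-field triples in one pass, then transpose with zip.
--     triples = [tuple(f.split(" ", 2)) if " " in f else (f, None, None) for f in fields]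
--     if not triples:
--         return ([], [], [])
--     c0, c1, c2 = (list(col) for col in zip(*triples))
--     return (c0, c1, c2)
-- ===== Notes on version B (the rewrite author's own statement) =====
-- stated objective: alternative
-- what changed: B builds a list of per-field triples in one comprehension and transposes it with zip(*...) into the three output lists, instead of A's stateful loop appending to three pre-made lists.
import Mathlib
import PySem

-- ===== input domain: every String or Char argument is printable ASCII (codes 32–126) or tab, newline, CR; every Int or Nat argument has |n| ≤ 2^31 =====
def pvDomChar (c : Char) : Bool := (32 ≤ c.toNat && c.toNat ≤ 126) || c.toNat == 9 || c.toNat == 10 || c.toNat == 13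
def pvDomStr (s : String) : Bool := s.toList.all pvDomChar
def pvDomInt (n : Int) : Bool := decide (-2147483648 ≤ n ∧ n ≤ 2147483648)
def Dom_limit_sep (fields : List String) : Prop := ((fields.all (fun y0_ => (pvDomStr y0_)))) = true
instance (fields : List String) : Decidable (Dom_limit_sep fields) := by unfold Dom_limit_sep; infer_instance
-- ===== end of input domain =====

-- B replaces A's stateful loop appending to three lists by a one-pass list of
-- per-field triples transposed with zip (alternative decomposition, same cost).

-- ===== PORT A =====
-- A: loop over fields with a triple of accumulator lists, appending per field.
def limit_sep (fields : List String) : List (Option String) × List (Option String) × List (Option String) :=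
  fields.foldl (fun st i =>
    if PySem.Str.isIn " " i then
      let a := (PySem.Str.splitMax? i " " 2).getD []
      (st.1 ++ [PySem.List.pyGet? a 0], st.2.1 ++ [PySem.List.pyGet? a 1], st.2.2 ++ [PySem.List.pyGet? a 2])
    else
      (st.1 ++ [some i], st.2.1 ++ [none], st.2.2 ++ [none]))
    ([], [], [])

-- ===== PORT B =====
-- B: one pass building per-field triples, then transpose (zip(*triples)) into three lists.
def limit_sep_altTriple (f : String) : Option String × Option String × Option String :=
  if PySem.Str.isIn " " f then
    let a := (PySem.Str.splitMax? f " " 2).getD []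
    (PySem.List.pyGet? a 0, PySem.List.pyGet? a 1, PySem.List.pyGet? a 2)
  else (some f, none, none)

def limit_sep_alt (fields : List String) : List (Option String) × List (Option String) × List (Option String) :=
  let triples := fields.map limit_sep_altTriple
  (triples.map (·.1), triples.map (·.2.1), triples.map (·.2.2))

-- ===== PRECONDITION & SPEC =====
-- Pre_ excludes fields containing exactly one space: there split(" ", 2) yields
-- only two parts and Python A raises IndexError on a[2] (B raises too).
def Pre_limit_sep (fields : List String) : Prop :=
  ∀ f ∈ fields, PySem.Str.count f " " ≠ 1
instance (fields : List String) : Decidable (Pre_limit_sep fields) := by unfold Pre_limit_sep; infer_instance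

def pvWitness_limit_sep : List String := ["a b c", "abc", "x  y z"]

def Spec_limit_sep (fields : List String) (out : List (Option String) × List (Option String) × List (Option String)) : Prop := out = limit_sep_alt fields
instance (fields : List String) (out : List (Option String) × List (Option String) × List (Option String)) : Decidable (Spec_limit_sep fields out) := by unfold Spec_limit_sep; infer_instance

-- ===== CLAIM (what is proved, stated in full; the proofs are below) =====
def Claim_equal_limit_sep : Prop := ∀ (fields : List String), Dom_limit_sep fields → Pre_limit_sep fields → Spec_limit_sep fields (limit_sep fields)

-- ===== LEMMAS AND PROOFS =====

theorem limit_sep_foldl (fields : List String)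
    (l0 l1 l2 : List (Option String)) :
    fields.foldl (fun st i =>
      if PySem.Str.isIn " " i then
        let a := (PySem.Str.splitMax? i " " 2).getD []
        (st.1 ++ [PySem.List.pyGet? a 0], st.2.1 ++ [PySem.List.pyGet? a 1], st.2.2 ++ [PySem.List.pyGet? a 2])
      else
        (st.1 ++ [some i], st.2.1 ++ [none], st.2.2 ++ [none])) (l0, l1, l2)
    = (l0 ++ (fields.map limit_sep_altTriple).map (·.1),
       l1 ++ (fields.map limit_sep_altTriple).map (·.2.1),
       l2 ++ (fields.map limit_sep_altTriple).map (·.2.2)) := by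
  induction fields generalizing l0 l1 l2 with
  | nil => simp
  | cons f rest ih =>
    simp only [List.foldl_cons]
    split_ifs with h <;>
      rw [ih] <;> simp at h <;> simp [limit_sep_altTriple, h]

-- ===== VERDICT (by name: the statement is the Claim_ definition above) =====
theorem limit_sep_spec : Claim_equal_limit_sep := by
  intro fields _ _
  show limit_sep fields = limit_sep_alt fields
  simpa [limit_sep, limit_sep_alt] using limit_sep_foldl fields [] [] []
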